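-- pv_equiv track=rewrite | github.com/zarbo-ian/SentimentAnalisis | funciones.py | calcular_puntaje_comentarios
-- ===== SOURCE A (Python) =====
-- def my_count(comentario, frase): #sustituto de .count()
--     counter = 0
--     frase_len = len(frase)
--     i = 0
--     while i <= len(comentario) - frase_len:
--         if comentario[i:i+frase_len] == frase:
--             counter += 1
--             i += frase_len
--         else:
--             i += 1
--     return counter
--
-- def calcular_puntaje_comentarios(comentarios, positivos, negativos):
--     puntajes = []
--     for comentario in comentarios:
--         puntaje = 0
--
--         for i in positivos:
--             puntaje += my_count(comentario, i)
--         for i in negativos: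
--             puntaje -= my_count(comentario, i)
--         puntajes.append(puntaje)
--
--     return puntajes
-- ===== SOURCE B (Python) =====
-- def contar_dp(c, frase):
--     # backwards DP over suffixes: dp[i] = non-overlapping count in c[i:]
--     n = len(c)
--     m = len(frase)
--     dp = [0] * (n + 1)
--     for i in range(n - 1, -1, -1):
--         if i + m <= n and c[i:i+m] == frase:
--             dp[i] = dp[i + m] + 1
--         else:
--             dp[i] = dp[i + 1]
--     return dp[0]
--
-- def calcular_puntaje_comentarios(comentarios, positivos, negativos):
--     frases = [(p, 1) for p in positivos] + [(n, -1) for n in negativos]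
--     puntajes = []
--     for c in comentarios:
--         total = 0
--         for frase, peso in frases:
--             total += peso * contar_dp(c, frase)
--         puntajes.append(total)
--     return puntajes
-- ===== Notes on version B (the rewrite author's own statement) =====
-- stated objective: alternative
-- what changed: Replaces A's forward greedy scan with a skip-after-match counter by a per-phrase backwards dynamic-programming table dp over suffixes (dp[i] = non-overlapping count in c[i:], dp[i] = dp[i+m]+1 on a match else dp[i+1]), and merges the two phrase loops into one pass over a weighted (phrase, +/-1) list.
-- outside the precondition, e.g. on calcular_puntaje_comentarios(['ab'], [''], []): A does not finish within the time limit, B returns [1]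
import Mathlib
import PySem

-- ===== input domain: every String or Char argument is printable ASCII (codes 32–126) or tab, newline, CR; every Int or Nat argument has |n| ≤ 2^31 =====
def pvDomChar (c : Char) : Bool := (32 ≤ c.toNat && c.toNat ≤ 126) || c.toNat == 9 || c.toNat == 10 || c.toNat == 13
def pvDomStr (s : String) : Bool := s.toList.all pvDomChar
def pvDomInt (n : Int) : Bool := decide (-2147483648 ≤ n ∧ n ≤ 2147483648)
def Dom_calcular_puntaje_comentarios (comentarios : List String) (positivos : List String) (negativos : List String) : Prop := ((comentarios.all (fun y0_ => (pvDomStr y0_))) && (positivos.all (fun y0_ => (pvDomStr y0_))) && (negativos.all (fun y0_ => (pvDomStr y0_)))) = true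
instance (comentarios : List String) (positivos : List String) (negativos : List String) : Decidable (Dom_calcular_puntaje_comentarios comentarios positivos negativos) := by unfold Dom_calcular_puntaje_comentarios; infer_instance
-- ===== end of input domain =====

-- B replaces A's forward greedy scan-and-skip counter by a backwards DP table over suffixes
-- (dp[i] = non-overlapping count in c[i:]) and one merged pass over a weighted phrase list;
-- same cost, genuinely different algorithmic structure.

-- ===== PORT A =====
-- A's while-loop in my_count: i starts at 0; while i <= len(comentario) - len(frase),
-- compare comentario[i:i+len(frase)] with frase, on a match count and jump len(frase), else step 1.
-- The fuel (length comentario + 1) is a pure totality device: the loop runs at most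
-- length comentario iterations whenever frase ≠ "" (the Pre_ below); for frase = "" Python diverges.
def pvMyCountLoop (com frase : List Char) : Nat → Int → Int → Int
  | 0, _, counter => counter
  | fuel + 1, i, counter =>
    if i ≤ (com.length : Int) - (frase.length : Int) then
      if PySem.List.slice com (some i) (some (i + (frase.length : Int))) == frase then
        pvMyCountLoop com frase fuel (i + (frase.length : Int)) (counter + 1)
      else
        pvMyCountLoop com frase fuel (i + 1) counter
    else counter

def my_count (comentario : String) (frase : String) : Int :=
  pvMyCountLoop comentario.toList frase.toList (comentario.toList.length + 1) 0 0

def calcular_puntaje_comentarios (comentarios : List String) (positivos : List String) (negativos : List String) : List Int :=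
  comentarios.foldl
    (fun puntajes comentario =>
      let p1 := positivos.foldl (fun puntaje i => puntaje + my_count comentario i) 0
      let p2 := negativos.foldl (fun puntaje i => puntaje - my_count comentario i) p1
      puntajes ++ [p2])
    []

-- ===== PORT B =====
-- contar_dp: backwards DP over suffixes, dp built by the loop for i in range(n-1, -1, -1);
-- dp[i] = dp[i+m]+1 on a match at i, else dp[i+1]; returns dp[0].
def contar_dp (c : String) (frase : String) : Int :=
  let cl := c.toList
  let fl := frase.toList
  let n : Int := (cl.length : Int)
  let m : Int := (fl.length : Int)
  let dp : List Int := List.replicate (cl.length + 1) 0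
  let dp := (PySem.List.pyRange (n - 1) (-1) (-1)).foldl
    (fun dp i =>
      if i + m ≤ n && (PySem.List.slice cl (some i) (some (i + m)) == fl) then
        PySem.List.pySetD dp i (PySem.List.pyGetD dp (i + m) 0 + 1)
      else
        PySem.List.pySetD dp i (PySem.List.pyGetD dp (i + 1) 0)) dp
  PySem.List.pyGetD dp 0 0

def calcular_puntaje_comentarios_alt (comentarios : List String) (positivos : List String) (negativos : List String) : List Int :=
  let frases := positivos.map (fun p => (p, (1 : Int))) ++ negativos.map (fun nn => (nn, (-1 : Int)))
  comentarios.foldl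
    (fun puntajes c =>
      puntajes ++ [frases.foldl (fun total fp => total + fp.2 * contar_dp c fp.1) 0])
    []

-- ===== PRECONDITION & SPEC =====
-- Pre_ excludes inputs where some phrase is the empty string while comentarios is nonempty:
-- there A's my_count loops forever (i += 0), so A never returns.
def Pre_calcular_puntaje_comentarios (comentarios : List String) (positivos : List String) (negativos : List String) : Prop :=
  comentarios = [] ∨ ("" ∉ positivos ∧ "" ∉ negativos)
instance (comentarios : List String) (positivos : List String) (negativos : List String) : Decidable (Pre_calcular_puntaje_comentarios comentarios positivos negativos) := by unfold Pre_calcular_puntaje_comentarios; infer_instance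

def pvWitness_calcular_puntaje_comentarios : List String × List String × List String :=
  (["ab ab b", "ba"], ["ab", "b"], ["ba"])

def Spec_calcular_puntaje_comentarios (comentarios : List String) (positivos : List String) (negativos : List String) (out : List Int) : Prop := out = calcular_puntaje_comentarios_alt comentarios positivos negativos
instance (comentarios : List String) (positivos : List String) (negativos : List String) (out : List Int) : Decidable (Spec_calcular_puntaje_comentarios comentarios positivos negativos out) := by unfold Spec_calcular_puntaje_comentarios; infer_instance

-- ===== CLAIM (what is proved, stated in full; the proofs are below) =====
def Claim_equal_calcular_puntaje_comentarios : Prop := ∀ (comentarios : List String) (positivos : List String) (negativos : List String), Dom_calcular_puntaje_comentarios comentarios positivos negativos → Pre_calcular_puntaje_comentarios comentarios positivos negativos → Spec_calcular_puntaje_comentarios comentarios positivos negativos (calcular_puntaje_comentarios comentarios positivos negativos)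

-- ===== LEMMAS AND PROOFS =====

-- unfolding equations for PySem.Chars.count.go (closed by rfl)
theorem pv_go_zero (sub l : List Char) (acc : Nat) :
    PySem.Chars.count.go sub 0 l acc = acc := by
  rw [PySem.Chars.count.go.eq_def]

theorem pv_go_nil (sub : List Char) (fuel acc : Nat) :
    PySem.Chars.count.go sub fuel [] acc = acc := by
  cases fuel <;> rw [PySem.Chars.count.go.eq_def]

theorem pv_go_cons (sub : List Char) (fuel : Nat) (x : Char) (t : List Char) (acc : Nat) :
    PySem.Chars.count.go sub (fuel + 1) (x :: t) acc
      = if sub.isPrefixOf (x :: t) = true then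
          PySem.Chars.count.go sub fuel (List.drop sub.length (x :: t)) (acc + 1)
        else PySem.Chars.count.go sub fuel t acc := by
  rw [PySem.Chars.count.go.eq_def]

-- When the remaining text is shorter than the pattern, go finds nothing.
theorem pv_go_short (sub : List Char) (fuel : Nat) :
    ∀ (l : List Char) (acc : Nat), l.length < sub.length →
      PySem.Chars.count.go sub fuel l acc = acc := by
  induction fuel with
  | zero => intro l acc _; exact pv_go_zero _ _ _
  | succ fuel ih =>
    intro l acc h
    cases l with
    | nil => exact pv_go_nil _ _ _
    | cons x t =>
      rw [pv_go_cons]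
      have hp : sub.isPrefixOf (x :: t) = false := by
        rw [Bool.eq_false_iff]
        intro hb
        have hlen := (List.isPrefixOf_iff_prefix.mp hb).length_le
        simp only [List.length_cons] at h hlen
        omega
      rw [hp, if_neg (by simp)]
      exact ih t acc (by simp only [List.length_cons] at h; omega)

-- go is affine in its accumulator.
theorem pv_go_acc (sub : List Char) (fuel : Nat) :
    ∀ (l : List Char) (acc : Nat),
      PySem.Chars.count.go sub fuel l acc = acc + PySem.Chars.count.go sub fuel l 0 := by
  induction fuel with
  | zero => intro l acc; rw [pv_go_zero, pv_go_zero]; omega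
  | succ fuel ih =>
    intro l acc
    cases l with
    | nil => rw [pv_go_nil, pv_go_nil]; omega
    | cons x t =>
      rw [pv_go_cons, pv_go_cons]
      by_cases hp : sub.isPrefixOf (x :: t) = true
      · rw [if_pos hp, if_pos hp,
          ih (List.drop sub.length (x :: t)) (acc + 1), ih (List.drop sub.length (x :: t)) 1]
        omega
      · rw [if_neg hp, if_neg hp, ih t acc]

-- Any fuel at least the text length computes the same as fuel = text length (pattern nonempty).
theorem pv_go_fuel (sub : List Char) (hne : sub ≠ []) (fuel : Nat) :
    ∀ (l : List Char) (acc : Nat), l.length ≤ fuel →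
      PySem.Chars.count.go sub fuel l acc = PySem.Chars.count.go sub l.length l acc := by
  induction fuel using Nat.strong_induction_on with
  | _ fuel ih =>
    intro l acc h
    match fuel with
    | 0 =>
      have : l = [] := List.eq_nil_of_length_eq_zero (by omega)
      subst this; rfl
    | fuel + 1 =>
      cases l with
      | nil => rw [pv_go_nil, pv_go_nil]
      | cons x t =>
        have hsub : 1 ≤ sub.length := by
          cases sub with | nil => exact absurd rfl hne | cons a b => simp
        rw [List.length_cons, pv_go_cons, pv_go_cons]
        by_cases hp : sub.isPrefixOf (x :: t) = true
        · rw [if_pos hp, if_pos hp]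
          have hd : (List.drop sub.length (x :: t)).length ≤ t.length := by
            simp only [List.length_drop, List.length_cons]; omega
          have h1 : (List.drop sub.length (x :: t)).length ≤ fuel := by
            simp only [List.length_cons] at h; omega
          rw [ih fuel (by omega) _ _ h1, ih t.length (by simp only [List.length_cons] at h; omega) _ _ hd]
        · rw [if_neg hp, if_neg hp]
          rw [ih fuel (by omega) t acc (by simp only [List.length_cons] at h; omega)]

-- the take-m comparison IS prefix-of (unconditionally: lengths differ when the text is short)
theorem pv_take_beq (p l : List Char) :
    (List.take p.length l == p) = p.isPrefixOf l := by
  cases hq : p.isPrefixOf l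
  · have hnp : ¬ p <+: l := by
      intro hc
      rw [List.isPrefixOf_iff_prefix.mpr hc] at hq
      exact absurd hq (by decide)
    have ht : List.take p.length l ≠ p := by
      intro he
      exact hnp (List.prefix_iff_eq_take.mpr he.symm)
    simp [ht]
  · have hpp : p <+: l := List.isPrefixOf_iff_prefix.mp hq
    have he := List.prefix_iff_eq_take.mp hpp
    simp [← he]

-- A's scanning loop equals PySem's count.go on the remaining suffix.
theorem pv_loop_eq_go (com frase : List Char) (hne : frase ≠ []) :
    ∀ (fuel i : Nat) (counter : Int), com.length - i < fuel →
      pvMyCountLoop com frase fuel (i : Int) counter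
        = counter + (PySem.Chars.count.go frase (com.drop i).length (com.drop i) 0 : Int) := by
  intro fuel
  induction fuel with
  | zero => intro i counter h; omega
  | succ fuel ih =>
    intro i counter h
    have hsub : 1 ≤ frase.length := by
      cases frase with | nil => exact absurd rfl hne | cons a b => simp
    show (if (i : Int) ≤ (com.length : Int) - (frase.length : Int) then _ else counter) = _
    by_cases hcond : (i : Int) ≤ (com.length : Int) - (frase.length : Int)
    · -- in-range step: i + frase.length ≤ com.length
      have hle : i + frase.length ≤ com.length := by omega
      rw [if_pos hcond]
      have hdl : (com.drop i).length = com.length - i := by simp [List.length_drop]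
      obtain ⟨x, t, hd⟩ : ∃ x t, com.drop i = x :: t := by
        cases hdd : com.drop i with
        | nil => exfalso; rw [hdd] at hdl; simp at hdl; omega
        | cons x t => exact ⟨x, t, rfl⟩
      have htl : t.length = com.length - i - 1 := by
        have h2 := hdl; rw [hd] at h2; simp only [List.length_cons] at h2; omega
      -- the slice comparison is prefix-of on the dropped suffix
      have hslice : PySem.List.slice com (some (i : Int)) (some ((i : Int) + (frase.length : Int)))
          = List.take frase.length (com.drop i) := by
        have hc : ((i : Int) + (frase.length : Int)) = ((i + frase.length : Nat) : Int) := by push_cast; ring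
        rw [hc, PySem.List.slice_natCast]
        congr 1; omega
      have hbeq : (PySem.List.slice com (some (i : Int)) (some ((i : Int) + (frase.length : Int))) == frase)
          = frase.isPrefixOf (com.drop i) := by
        rw [hslice, pv_take_beq]
      rw [hbeq]
      -- unfold go on the right
      have hgounf : PySem.Chars.count.go frase (com.drop i).length (com.drop i) 0
          = if frase.isPrefixOf (com.drop i) = true then
              PySem.Chars.count.go frase t.length (List.drop frase.length (com.drop i)) 1
            else PySem.Chars.count.go frase t.length t 0 := by
        conv_lhs => rw [hd, List.length_cons, pv_go_cons]
        rw [hd]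
      by_cases hp : frase.isPrefixOf (com.drop i) = true
      · rw [if_pos hp]
        have hcast : (i : Int) + (frase.length : Int) = ((i + frase.length : Nat) : Int) := by push_cast; ring
        rw [hcast, ih (i + frase.length) (counter + 1) (by omega)]
        rw [hgounf, if_pos hp]
        have hdd : List.drop frase.length (List.drop i com) = com.drop (i + frase.length) := by
          rw [List.drop_drop]
        rw [hdd]
        have hlen2 : (com.drop (i + frase.length)).length ≤ t.length := by
          simp only [List.length_drop]; omega
        rw [pv_go_fuel frase hne t.length _ _ hlen2,
          pv_go_acc frase (com.drop (i + frase.length)).length (com.drop (i + frase.length)) 1]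
        push_cast; ring
      · rw [if_neg (by simpa using hp)]
        have hcast : (i : Int) + 1 = ((i + 1 : Nat) : Int) := by push_cast; ring
        rw [hcast, ih (i + 1) counter (by omega)]
        rw [hgounf, if_neg hp]
        have ht : com.drop (i + 1) = t := by
          have h1 : List.drop 1 (com.drop i) = com.drop (i + 1) := by rw [List.drop_drop]
          rw [← h1, hd]; rfl
        rw [ht]
    · -- out of range: loop exits, and go finds nothing in the short suffix
      rw [if_neg hcond]
      have hshort : (com.drop i).length < frase.length := by
        simp only [List.length_drop]; omega
      rw [pv_go_short frase _ _ _ hshort]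
      simp

-- my_count equals Python's str.count for a nonempty phrase.
theorem pv_my_count_eq (c s : String) (hs : s ≠ "") :
    my_count c s = (PySem.Str.count c s : Int) := by
  have hne : s.toList ≠ [] := by simpa using hs
  rw [PySem.Str.count_eq, PySem.Chars.count.eq_def,
    if_neg (by simpa [List.isEmpty_iff] using hne)]
  unfold my_count
  have hl := pv_loop_eq_go c.toList s.toList hne (c.toList.length + 1) 0 0 (by omega)
  simp only [List.drop_zero, Nat.cast_zero, zero_add] at hl
  rw [hl, pv_go_fuel s.toList hne c.toList.length c.toList 0 (le_refl _)]

-- ===== B-side lemmas =====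

-- the suffix count: pvG c p j = non-overlapping count of p in c.drop j
def pvG (c p : List Char) (j : Nat) : Int :=
  (PySem.Chars.count.go p (c.drop j).length (c.drop j) 0 : Int)

theorem pv_g_end (c p : List Char) : pvG c p c.length = 0 := by
  unfold pvG
  rw [List.drop_length, pv_go_nil]
  rfl

-- the DP recurrence that A's greedy count satisfies
theorem pv_g_step (c p : List Char) (hne : p ≠ []) (j : Nat) (hj : j < c.length) :
    pvG c p j = if p.isPrefixOf (c.drop j) then pvG c p (j + p.length) + 1 else pvG c p (j + 1) := by
  have hsub : 1 ≤ p.length := by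
    cases p with | nil => exact absurd rfl hne | cons a b => simp
  have hdl : (c.drop j).length = c.length - j := by simp [List.length_drop]
  obtain ⟨x, t, hd⟩ : ∃ x t, c.drop j = x :: t := by
    cases hdd : c.drop j with
    | nil => exfalso; rw [hdd] at hdl; simp at hdl; omega
    | cons x t => exact ⟨x, t, rfl⟩
  have htl : t.length = c.length - j - 1 := by
    have h2 := hdl; rw [hd] at h2; simp only [List.length_cons] at h2; omega
  have ht : c.drop (j + 1) = t := by
    have h1 : List.drop 1 (c.drop j) = c.drop (j + 1) := by rw [List.drop_drop]
    rw [← h1, hd]; rfl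
  have hgounf : PySem.Chars.count.go p (c.drop j).length (c.drop j) 0
      = if p.isPrefixOf (c.drop j) = true then
          PySem.Chars.count.go p t.length (List.drop p.length (c.drop j)) 1
        else PySem.Chars.count.go p t.length t 0 := by
    conv_lhs => rw [hd, List.length_cons, pv_go_cons]
    rw [hd]
  unfold pvG
  rw [hgounf]
  by_cases hp : p.isPrefixOf (c.drop j) = true
  · rw [if_pos hp, if_pos hp]
    have hple : p.length ≤ (c.drop j).length := (List.isPrefixOf_iff_prefix.mp hp).length_le
    rw [List.drop_drop]
    have hlen2 : (c.drop (j + p.length)).length ≤ t.length := by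
      simp only [List.length_drop]
      omega
    rw [pv_go_fuel p hne t.length _ _ hlen2,
      pv_go_acc p (c.drop (j + p.length)).length (c.drop (j + p.length)) 1]
    push_cast; ring
  · rw [if_neg hp, if_neg (by simpa using hp), ht]

-- the loop's Bool condition is exactly prefix-of at index i
theorem pv_cond_eq (c p : List Char) (hne : p ≠ []) (i : Nat) :
    (((i : Int) + (p.length : Int) ≤ (c.length : Int) : Bool)
        && (PySem.List.slice c (some (i : Int)) (some ((i : Int) + (p.length : Int))) == p))
      = p.isPrefixOf (c.drop i) := by
  by_cases hle : i + p.length ≤ c.length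
  · have hc1 : (((i : Int) + (p.length : Int) ≤ (c.length : Int) : Bool)) = true := by
      simp; omega
    have hslice : PySem.List.slice c (some (i : Int)) (some ((i : Int) + (p.length : Int)))
        = List.take p.length (c.drop i) := by
      have hc : ((i : Int) + (p.length : Int)) = ((i + p.length : Nat) : Int) := by push_cast; ring
      rw [hc, PySem.List.slice_natCast]
      congr 1; omega
    rw [hc1, Bool.true_and, hslice, pv_take_beq]
  · have hc1 : (((i : Int) + (p.length : Int) ≤ (c.length : Int) : Bool)) = false := by
      simp; omega
    have hp : p.isPrefixOf (c.drop i) = false := by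
      rw [Bool.eq_false_iff]
      intro hb
      have hsub : 1 ≤ p.length := by
        cases p with | nil => exact absurd rfl hne | cons a b => simp
      have := (List.isPrefixOf_iff_prefix.mp hb).length_le
      simp only [List.length_drop] at this
      omega
    rw [hc1, Bool.false_and, hp]

-- pyGetD on a replicate-0 table is 0
theorem pv_getD_replicate (k j : Nat) :
    PySem.List.pyGetD (List.replicate k (0 : Int)) (j : Int) 0 = 0 := by
  rw [PySem.List.pyGetD_natCast]
  rcases Nat.lt_or_ge j k with h | h
  · simp [List.getD, h]
  · rw [List.getD_eq_default]
    simp [h]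

-- the backwards DP loop fills every cell ≥ its lower bound with pvG
theorem pv_dp_loop (c p : List Char) (hne : p ≠ []) :
    ∀ (kk : Nat), kk ≤ c.length → ∀ (dp : List Int), dp.length = c.length + 1 →
      (∀ j : Nat, kk ≤ j → j ≤ c.length → PySem.List.pyGetD dp (j : Int) 0 = pvG c p j) →
      ∀ j : Nat, j ≤ c.length →
        PySem.List.pyGetD
          ((PySem.List.pyRange ((kk : Int) - 1) (-1) (-1)).foldl
            (fun dp i =>
              if i + (p.length : Int) ≤ (c.length : Int)
                  && (PySem.List.slice c (some i) (some (i + (p.length : Int))) == p) then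
                PySem.List.pySetD dp i (PySem.List.pyGetD dp (i + (p.length : Int)) 0 + 1)
              else
                PySem.List.pySetD dp i (PySem.List.pyGetD dp (i + 1) 0)) dp)
          (j : Int) 0 = pvG c p j := by
  intro kk
  induction kk with
  | zero =>
    intro _ dp _ hdp j hj
    rw [PySem.List.pyRange_neg_one_eq_nil (by norm_num)]
    exact hdp j (Nat.zero_le j) hj
  | succ kk ih =>
    intro hkk dp hlen hdp j hj
    have hklt : kk < c.length := by omega
    have hcons : PySem.List.pyRange (((kk + 1 : Nat) : Int) - 1) (-1) (-1)
        = (kk : Int) :: PySem.List.pyRange ((kk : Int) - 1) (-1) (-1) := by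
      have h1 : (((kk + 1 : Nat) : Int) - 1) = (kk : Int) := by push_cast; ring
      rw [h1, PySem.List.pyRange_neg_one_cons (by omega)]
    rw [hcons, List.foldl_cons]
    -- the one step at index kk
    set dp1 := (if (kk : Int) + (p.length : Int) ≤ (c.length : Int)
          && (PySem.List.slice c (some (kk : Int)) (some ((kk : Int) + (p.length : Int))) == p) then
        PySem.List.pySetD dp (kk : Int) (PySem.List.pyGetD dp ((kk : Int) + (p.length : Int)) 0 + 1)
      else
        PySem.List.pySetD dp (kk : Int) (PySem.List.pyGetD dp ((kk : Int) + 1) 0)) with hdp1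
    have hlen1 : dp1.length = c.length + 1 := by
      rw [hdp1]
      split <;> rw [PySem.List.length_pySetD, hlen]
    have hdp1v : ∀ j : Nat, kk ≤ j → j ≤ c.length → PySem.List.pyGetD dp1 (j : Int) 0 = pvG c p j := by
      intro j hj1 hj2
      rw [hdp1, pv_cond_eq c p hne kk]
      by_cases hp : p.isPrefixOf (c.drop kk) = true
      · rw [if_pos hp, PySem.List.pyGetD_pySetD_natCast dp kk j _ 0 (by omega)]
        by_cases hjk : j = kk
        · rw [if_pos hjk, hjk]
          have hple : p.length ≤ (c.drop kk).length := (List.isPrefixOf_iff_prefix.mp hp).length_le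
          have hple2 : kk + p.length ≤ c.length := by
            simp only [List.length_drop] at hple; omega
          have hsub : 1 ≤ p.length := by
            cases p with | nil => exact absurd rfl hne | cons a b => simp
          have hc : (kk : Int) + (p.length : Int) = ((kk + p.length : Nat) : Int) := by push_cast; ring
          rw [hc, hdp (kk + p.length) (by omega) hple2]
          rw [pv_g_step c p hne kk hklt, if_pos hp]
        · rw [if_neg hjk]
          exact hdp j (by omega) hj2
      · rw [if_neg hp, PySem.List.pyGetD_pySetD_natCast dp kk j _ 0 (by omega)]
        by_cases hjk : j = kk
        · rw [if_pos hjk, hjk]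
          have hc : (kk : Int) + 1 = ((kk + 1 : Nat) : Int) := by push_cast; ring
          rw [hc, hdp (kk + 1) (by omega) (by omega)]
          rw [pv_g_step c p hne kk hklt, if_neg hp]
        · rw [if_neg hjk]
          exact hdp j (by omega) hj2
    exact ih (by omega) dp1 hlen1 hdp1v j hj

-- contar_dp equals Python's str.count for a nonempty phrase.
theorem pv_contar_dp_eq (c s : String) (hs : s ≠ "") :
    contar_dp c s = (PySem.Str.count c s : Int) := by
  have hne : s.toList ≠ [] := by simpa using hs
  unfold contar_dp
  have hmain := pv_dp_loop c.toList s.toList hne c.toList.length (le_refl _)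
    (List.replicate (c.toList.length + 1) 0)
    (by simp)
    (by
      intro j hj1 hj2
      have hj : j = c.toList.length := by omega
      rw [hj, pv_getD_replicate, pv_g_end])
    0 (Nat.zero_le _)
  simp only [Nat.cast_zero] at hmain
  rw [hmain]
  unfold pvG
  rw [PySem.Str.count_eq, PySem.Chars.count.eq_def,
    if_neg (by simpa [List.isEmpty_iff] using hne)]
  simp [List.drop_zero]

-- fold of A's '+ my_count' equals the start plus the sum of counts (phrases nonempty).
theorem pv_fold_add (c : String) (l : List String) (hl : "" ∉ l) :
    ∀ (a : Int), l.foldl (fun p s => p + my_count c s) a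
      = a + (l.map (fun s => (PySem.Str.count c s : Int))).sum := by
  induction l with
  | nil => intro a; simp
  | cons x t ih =>
    intro a
    have hx : x ≠ "" := by intro h; exact hl (by simp [h])
    have ht : "" ∉ t := fun h => hl (by simp [h])
    simp only [List.foldl_cons, List.map_cons, List.sum_cons]
    rw [ih ht, pv_my_count_eq c x hx]
    ring

-- fold of A's '- my_count' equals the start minus the sum of counts (phrases nonempty).
theorem pv_fold_sub (c : String) (l : List String) (hl : "" ∉ l) :
    ∀ (a : Int), l.foldl (fun p s => p - my_count c s) a
      = a - (l.map (fun s => (PySem.Str.count c s : Int))).sum := by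
  induction l with
  | nil => intro a; simp
  | cons x t ih =>
    intro a
    have hx : x ≠ "" := by intro h; exact hl (by simp [h])
    have ht : "" ∉ t := fun h => hl (by simp [h])
    simp only [List.foldl_cons, List.map_cons, List.sum_cons]
    rw [ih ht, pv_my_count_eq c x hx]
    ring

-- fold of B's weighted step over a constant-weight phrase list.
theorem pv_fold_w (c : String) (w : Int) (l : List String) (hl : "" ∉ l) :
    ∀ (a : Int), ((l.map (fun s => (s, w))).foldl (fun total fp => total + fp.2 * contar_dp c fp.1) a)
      = a + w * (l.map (fun s => (PySem.Str.count c s : Int))).sum := by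
  induction l with
  | nil => intro a; simp
  | cons x t ih =>
    intro a
    have hx : x ≠ "" := by intro h; exact hl (by simp [h])
    have ht : "" ∉ t := fun h => hl (by simp [h])
    simp only [List.map_cons, List.foldl_cons, List.sum_cons]
    rw [ih ht, pv_contar_dp_eq c x hx]
    ring

-- ===== VERDICT (by name: the statement is the Claim_ definition above) =====
theorem calcular_puntaje_comentarios_spec : Claim_equal_calcular_puntaje_comentarios := by
  intro comentarios positivos negativos _ hpre
  unfold Spec_calcular_puntaje_comentarios
  rcases hpre with hnil | ⟨hp, hn⟩
  · subst hnil; rfl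
  · unfold calcular_puntaje_comentarios calcular_puntaje_comentarios_alt
    rw [PySem.List.foldl_append_singleton_eq_map
      (fun comentario =>
        negativos.foldl (fun puntaje i => puntaje - my_count comentario i)
          (positivos.foldl (fun puntaje i => puntaje + my_count comentario i) 0))
      comentarios [],
      PySem.List.foldl_append_singleton_eq_map
      (fun c =>
        (positivos.map (fun p => (p, (1 : Int))) ++ negativos.map (fun nn => (nn, (-1 : Int)))).foldl
          (fun total fp => total + fp.2 * contar_dp c fp.1) 0)
      comentarios []]
    simp only [List.nil_append]
    apply List.map_congr_left
    intro c _
    rw [pv_fold_sub c negativos hn, pv_fold_add c positivos hp,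
      List.foldl_append, pv_fold_w c 1 positivos hp, pv_fold_w c (-1) negativos hn]
    ring
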